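-- pv_equiv track=rewrite | github.com/asapcal/code-lab | beecrowdvl/test/mate.py | codificar_palavra
-- ===== SOURCE A (Python) =====
-- def codificar_palavra(palavra):
--     pilha = []
--     resultado = []
--
--     # Itera sobre cada letra e aplica a lógica alternada
--     for i, letra in enumerate(palavra):
--         if i % 2 == 0:  # Índice par: coloca na pilha
--             pilha.append(letra)
--         else:  # Índice ímpar: anota diretamente no resultado
--             resultado.append(letra)
--
--     # Após o fim, esvaziamos a pilha e adicionamos ao resultado
--     while pilha:
--         resultado.append(pilha.pop())
--
--     # Junta o resultado em uma string
--     return ''.join(resultado)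
-- ===== SOURCE B (Python) =====
-- def codificar_palavra(palavra):
--     return palavra[1::2] + palavra[0::2][::-1]
-- ===== Notes on version B (the rewrite author's own statement) =====
-- stated objective: simpler
-- what changed: Replaces the enumerate loop with a stack plus a pop-until-empty drain by a one-line closed form: the odd-indexed slice followed by the reversed even-indexed slice.
import Mathlib
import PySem

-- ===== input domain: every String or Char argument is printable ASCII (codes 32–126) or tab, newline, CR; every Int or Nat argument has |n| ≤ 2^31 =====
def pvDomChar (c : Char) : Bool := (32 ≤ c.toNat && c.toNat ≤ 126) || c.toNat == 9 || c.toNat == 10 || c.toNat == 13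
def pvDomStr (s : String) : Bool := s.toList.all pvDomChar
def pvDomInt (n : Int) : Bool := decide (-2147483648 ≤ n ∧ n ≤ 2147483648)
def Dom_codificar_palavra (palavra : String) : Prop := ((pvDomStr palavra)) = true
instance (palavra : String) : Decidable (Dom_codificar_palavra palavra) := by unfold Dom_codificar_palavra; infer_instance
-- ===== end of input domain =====

-- B replaces A's enumerate/stack/pop-drain loop by the closed form palavra[1::2] + palavra[0::2][::-1] (simpler, same cost).


-- ===== PORT A =====
-- 'while pilha: resultado.append(pilha.pop())'
def pvDrain : List Char → List Char → List Char
  | [], res => res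
  | p :: ps, res => pvDrain (p :: ps).dropLast (res ++ [(p :: ps).getLast (by simp)])
termination_by p _ => p.length
decreasing_by simp

def codificar_palavra (palavra : String) : String :=
  let st := (PySem.List.enumerate palavra.toList 0).foldl
    (fun (st : List Char × List Char) (p : Int × Char) =>
      if PySem.Int.mod p.1 2 = 0 then (st.1 ++ [p.2], st.2)
      else (st.1, st.2 ++ [p.2])) ([], [])
  String.ofList (pvDrain st.1 st.2)

-- ===== PORT B =====
-- palavra[1::2] + palavra[0::2][::-1]; .getD [] is safe: slice? is none only for step 0
def codificar_palavra_alt (palavra : String) : String :=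
  let l := palavra.toList
  let impar := (PySem.Chars.slice? l (some 1) none 2).getD []
  let par := (PySem.Chars.slice? l none none 2).getD []
  String.ofList (impar ++ (PySem.Chars.slice? par none none (-1)).getD [])

-- ===== PRECONDITION & SPEC =====
def Spec_codificar_palavra (palavra : String) (out : String) : Prop := out = codificar_palavra_alt palavra
instance (palavra : String) (out : String) : Decidable (Spec_codificar_palavra palavra out) := by unfold Spec_codificar_palavra; infer_instance

-- ===== CLAIM (what is proved, stated in full; the proofs are below) =====
def Claim_equal_codificar_palavra : Prop := ∀ (palavra : String), Dom_codificar_palavra palavra → Spec_codificar_palavra palavra (codificar_palavra palavra)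

-- ===== LEMMAS AND PROOFS =====

-- letters at the even indices 0,2,4,…
def pvEvens : List Char → List Char
  | [] => []
  | [a] => [a]
  | a :: _ :: t => a :: pvEvens t

theorem pvEvens_cons (a : Char) (t : List Char) : pvEvens (a :: t) = a :: pvEvens t.tail := by
  cases t <;> rfl

theorem pvDrain_eq (p res : List Char) : pvDrain p res = res ++ p.reverse := by
  match p with
  | [] => simp [pvDrain]
  | q :: qs =>
    rw [pvDrain, pvDrain_eq]
    conv_rhs => rw [← List.dropLast_concat_getLast (l := q :: qs) (by simp)]
    simp
termination_by p.length
decreasing_by simp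

theorem pvEnumFilter (l : List Char) (s : Int) :
    ((PySem.List.enumerate l s).filter (fun e => decide (PySem.Int.mod e.1 2 = 0))).map
        (fun e : Int × Char => e.2)
      = if PySem.Int.mod s 2 = 0 then pvEvens l else pvEvens l.tail := by
  have h2 : ∀ x : Int, PySem.Int.mod x 2 = x % 2 :=
    fun x => PySem.Int.mod_eq_emod_of_pos (by norm_num)
  induction l generalizing s with
  | nil =>
    simp only [PySem.List.enumerate_nil, List.filter_nil, List.map_nil, List.tail_nil]
    split <;> rfl
  | cons a t ih =>
    rw [PySem.List.enumerate_cons, List.filter_cons]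
    simp only [h2] at ih ⊢
    by_cases hs : s % 2 = 0
    · rw [if_pos (by exact decide_eq_true hs)]
      rw [List.map_cons, ih (s + 1)]
      rw [if_neg (by omega : ¬ (s + 1) % 2 = 0)]
      rw [if_pos hs, pvEvens_cons]
    · rw [if_neg (by rw [decide_eq_true_eq]; exact hs)]
      rw [ih (s + 1)]
      rw [if_pos (by omega : (s + 1) % 2 = 0)]
      rw [if_neg hs, List.tail_cons]

theorem pvEnumFilterNot (l : List Char) (s : Int) :
    ((PySem.List.enumerate l s).filter (fun e => decide (¬ PySem.Int.mod e.1 2 = 0))).map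
        (fun e : Int × Char => e.2)
      = if PySem.Int.mod s 2 = 0 then pvEvens l.tail else pvEvens l := by
  have h2 : ∀ x : Int, PySem.Int.mod x 2 = x % 2 :=
    fun x => PySem.Int.mod_eq_emod_of_pos (by norm_num)
  induction l generalizing s with
  | nil =>
    simp only [PySem.List.enumerate_nil, List.filter_nil, List.map_nil, List.tail_nil]
    split <;> rfl
  | cons a t ih =>
    rw [PySem.List.enumerate_cons, List.filter_cons]
    simp only [h2] at ih ⊢
    by_cases hs : s % 2 = 0
    · rw [if_neg (by rw [decide_eq_true_eq]; exact not_not_intro hs)]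
      rw [ih (s + 1)]
      rw [if_neg (by omega : ¬ (s + 1) % 2 = 0)]
      rw [if_pos hs, List.tail_cons]
    · rw [if_pos (by exact decide_eq_true hs)]
      rw [List.map_cons, ih (s + 1)]
      rw [if_pos (by omega : (s + 1) % 2 = 0)]
      rw [if_neg hs, pvEvens_cons]

theorem pvKey (l : List Char) :
    (List.range ((l.length + 1) / 2)).filterMap (fun k => l[2 * k]?) = pvEvens l := by
  match l with
  | [] => simp [pvEvens]
  | [a] =>
    have h1 : ([a].length + 1) / 2 = 1 := by simp
    rw [h1, List.range_one]
    simp [pvEvens]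
  | a :: b :: t =>
    have ih := pvKey t
    have hlen : ((a :: b :: t).length + 1) / 2 = (t.length + 1) / 2 + 1 := by
      rw [List.length_cons, List.length_cons]; omega
    have hidx : ∀ k : Nat, (a :: b :: t)[2 * (k + 1)]? = t[2 * k]? := by
      intro k
      rw [show 2 * (k + 1) = 2 * k + 1 + 1 by ring]
      simp
    rw [hlen, List.range_succ_eq_map]
    simp only [List.filterMap_cons, List.filterMap_map, Function.comp_def,
      Nat.succ_eq_add_one, hidx]
    rw [ih]
    rfl
termination_by l.length

theorem pvToNatDiv (m : Nat) : (((m : Int)) / 2).toNat = m / 2 := by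
  omega

theorem pvCount (n : Nat) :
    (if 0 < n then (((n : Int) + 2 - 1) / 2).toNat else 0) = (n + 1) / 2 := by
  rcases Nat.eq_zero_or_pos n with h | h
  · subst h; simp
  · rw [if_pos h, show ((n : Int) + 2 - 1) = ((n + 1 : Nat) : Int) by push_cast; ring,
      pvToNatDiv]

theorem pvSliceEvens (l : List Char) :
    PySem.List.slice? l none none 2 = some (pvEvens l) := by
  simp only [PySem.List.slice?, PySem.List.sliceIndices]
  norm_num
  rw [pvCount]
  have hfun : (fun x : Nat => l[((2 : Int) * ↑x).toNat]?) = (fun x : Nat => l[2 * x]?) := by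
    funext x; congr 1
  rw [hfun, pvKey]

theorem pvSliceOdds (l : List Char) :
    PySem.List.slice? l (some 1) none 2 = some (pvEvens l.tail) := by
  cases l with
  | nil => rfl
  | cons a t =>
    simp only [PySem.List.slice?, PySem.List.sliceIndices]
    norm_num
    rw [pvCount]
    have hfun : (fun x : Nat => (a :: t)[((1 : Int) + 2 * ↑x).toNat]?)
        = (fun x : Nat => t[2 * x]?) := by
      funext x
      rw [show ((1 : Int) + 2 * ↑x).toNat = 2 * x + 1 by omega]
      simp
    rw [hfun, pvKey]

-- ===== VERDICT (by name: the statement is the Claim_ definition above) =====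
theorem codificar_palavra_spec : Claim_equal_codificar_palavra := by
  intro palavra _
  unfold Spec_codificar_palavra codificar_palavra codificar_palavra_alt
  dsimp only
  rw [show (fun (st : List Char × List Char) (p : Int × Char) =>
        if PySem.Int.mod p.1 2 = 0 then (st.1 ++ [p.2], st.2) else (st.1, st.2 ++ [p.2]))
      = (fun (st : List Char × List Char) (p : Int × Char) =>
        ((fun (acc : List Char) (p : Int × Char) =>
            if PySem.Int.mod p.1 2 = 0 then acc ++ [p.2] else acc) st.1 p,
         (fun (acc : List Char) (p : Int × Char) =>
            if ¬ PySem.Int.mod p.1 2 = 0 then acc ++ [p.2] else acc) st.2 p)) by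
    funext st p
    dsimp only
    by_cases h : PySem.Int.mod p.1 2 = 0
    · rw [if_pos h, if_pos h, if_neg (not_not_intro h)]
    · rw [if_neg h, if_neg h, if_pos h]]
  rw [PySem.List.foldl_prod_mk
        (f := fun (acc : List Char) (p : Int × Char) =>
          if PySem.Int.mod p.1 2 = 0 then acc ++ [p.2] else acc)
        (g := fun (acc : List Char) (p : Int × Char) =>
          if ¬ PySem.Int.mod p.1 2 = 0 then acc ++ [p.2] else acc)]
  dsimp only
  rw [PySem.List.foldl_append_ite (p := fun e : Int × Char => PySem.Int.mod e.1 2 = 0)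
        (f := fun e : Int × Char => e.2)]
  rw [PySem.List.foldl_append_ite (p := fun e : Int × Char => ¬ PySem.Int.mod e.1 2 = 0)
        (f := fun e : Int × Char => e.2)]
  rw [List.nil_append, List.nil_append]
  have he := pvEnumFilter palavra.toList 0
  have ho := pvEnumFilterNot palavra.toList 0
  have h0 : PySem.Int.mod 0 2 = 0 := by decide
  rw [if_pos h0] at he ho
  rw [he, ho, pvDrain_eq]
  simp only [PySem.Chars.slice?_eq_listSlice?]
  rw [pvSliceEvens, pvSliceOdds, Option.getD_some, Option.getD_some,
    PySem.List.slice?_none_none_neg_one, Option.getD_some]
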